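-- pv_equiv track=rewrite | github.com/alex-d-boyd/Advent-of-Code-2022 | Day_10/day_10.py | command_for_cycle
-- ===== SOURCE A (Python) =====
-- def command_for_cycle(commands, cycle):
--     consumed_cycles = 0
--     for i, command in enumerate(commands):
--         if command == 0:
--             consumed_cycles += 1
--         else:
--             consumed_cycles += 2
--         if consumed_cycles >= cycle:
--             return i
--     else:
--         return None
-- ===== SOURCE B (Python) =====
-- def command_for_cycle(commands, cycle):
--     # prefix sums of per-command cycle costs, then binary search (bisect_left)
--     prefix = []
--     total = 0
--     for c in commands:
--         total += 1 if c == 0 else 2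
--         prefix.append(total)
--     lo, hi = 0, len(prefix)
--     while lo < hi:
--         mid = (lo + hi) // 2
--         if prefix[mid] < cycle:
--             lo = mid + 1
--         else:
--             hi = mid
--     return lo if lo < len(prefix) else None
-- ===== Notes on version B (the rewrite author's own statement) =====
-- stated objective: alternative
-- what changed: Replaced the linear scan accumulating consumed cycles with a prefix-sum array built once plus a hand-written bisect_left binary search over it.
import Mathlib
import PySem

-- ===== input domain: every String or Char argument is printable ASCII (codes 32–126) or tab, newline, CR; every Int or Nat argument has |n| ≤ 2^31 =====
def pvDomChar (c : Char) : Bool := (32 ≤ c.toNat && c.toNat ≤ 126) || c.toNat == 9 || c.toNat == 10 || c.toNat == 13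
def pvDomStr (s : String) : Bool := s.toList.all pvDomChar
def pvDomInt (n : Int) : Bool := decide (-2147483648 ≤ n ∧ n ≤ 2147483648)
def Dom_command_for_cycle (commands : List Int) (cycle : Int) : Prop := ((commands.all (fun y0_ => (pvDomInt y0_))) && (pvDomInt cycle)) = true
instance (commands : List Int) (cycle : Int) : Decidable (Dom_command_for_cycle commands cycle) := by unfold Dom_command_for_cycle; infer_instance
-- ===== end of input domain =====

-- B replaces A's linear scan with a prefix-sum array plus bisect_left binary search (alternative algorithm; same return value proved).


-- ===== PORT A =====
-- the for-loop of A: state = (consumed_cycles, i), one step per command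
def cfcGoA (cycle : Int) (cs : List Int) (consumed i : Int) : Option Int :=
  match cs with
  | [] => none
  | c :: rest =>
    let consumed' := consumed + (if c = 0 then 1 else 2)
    if cycle ≤ consumed' then some i else cfcGoA cycle rest consumed' (i + 1)

def command_for_cycle (commands : List Int) (cycle : Int) : Option Int :=
  cfcGoA cycle commands 0 0

-- ===== PORT B =====
-- B's first loop: build the prefix-sum list of cumulative cycle costs (state = total)
def cfcPrefix (cs : List Int) (total : Int) : List Int :=
  match cs with
  | [] => []
  | c :: rest =>
    let t := total + (if c = 0 then 1 else 2)
    t :: cfcPrefix rest t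

-- B's while-loop: bisect_left. prefix[mid] is always in range (lo < hi ≤ len), ported as getD mid 0.
def cfcBsearch (pre : List Int) (cycle : Int) (lo hi : Nat) : Nat :=
  if lo < hi then
    let mid := (lo + hi) / 2
    if pre.getD mid 0 < cycle then cfcBsearch pre cycle (mid + 1) hi
    else cfcBsearch pre cycle lo mid
  else lo
termination_by hi - lo
decreasing_by all_goals omega

def command_for_cycle_alt (commands : List Int) (cycle : Int) : Option Int :=
  let pre := cfcPrefix commands 0
  let lo := cfcBsearch pre cycle 0 pre.length
  if lo < pre.length then some (lo : Int) else none

-- ===== PRECONDITION & SPEC =====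
def Spec_command_for_cycle (commands : List Int) (cycle : Int) (out : Option Int) : Prop := out = command_for_cycle_alt commands cycle
instance (commands : List Int) (cycle : Int) (out : Option Int) : Decidable (Spec_command_for_cycle commands cycle out) := by unfold Spec_command_for_cycle; infer_instance

-- ===== CLAIM (what is proved, stated in full; the proofs are below) =====
def Claim_equal_command_for_cycle : Prop := ∀ (commands : List Int) (cycle : Int), Dom_command_for_cycle commands cycle → Spec_command_for_cycle commands cycle (command_for_cycle commands cycle)

-- ===== LEMMAS AND PROOFS =====

-- every element of cfcPrefix cs t is ≥ t
theorem cfcPrefix_mem_le (cs : List Int) (t x : Int) (hx : x ∈ cfcPrefix cs t) : t ≤ x := by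
  induction cs generalizing t with
  | nil => simp [cfcPrefix] at hx
  | cons c rest ih =>
    simp only [cfcPrefix, List.mem_cons] at hx
    rcases hx with h | h
    · subst h; split <;> omega
    · have := ih _ h; split at this <;> omega

theorem cfcPrefix_pairwise (cs : List Int) (t : Int) :
    (cfcPrefix cs t).Pairwise (· ≤ ·) := by
  induction cs generalizing t with
  | nil => simp [cfcPrefix]
  | cons c rest ih =>
    simp only [cfcPrefix]
    refine List.pairwise_cons.mpr ⟨fun x hx => ?_, ih _⟩
    exact cfcPrefix_mem_le _ _ _ hx

-- monotonicity of getD over the prefix list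
theorem cfcPrefix_mono (pre : List Int) (hp : pre.Pairwise (· ≤ ·))
    (i j : Nat) (hij : i ≤ j) (hj : j < pre.length) :
    pre.getD i 0 ≤ pre.getD j 0 := by
  rcases eq_or_lt_of_le hij with rfl | hlt
  · exact le_refl _
  · have hi : i < pre.length := lt_trans hlt hj
    rw [List.getD_eq_getElem _ _ hi, List.getD_eq_getElem _ _ hj]
    exact (List.pairwise_iff_getElem.mp hp) i j hi hj hlt

-- characterization of A's loop by a "least index" r
theorem cfcGoA_char (cs : List Int) (cycle : Int) :
    ∀ (consumed i : Int) (r : Nat),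
      (∀ j < r, (cfcPrefix cs consumed).getD j 0 < cycle) →
      (r < (cfcPrefix cs consumed).length → cycle ≤ (cfcPrefix cs consumed).getD r 0) →
      r ≤ (cfcPrefix cs consumed).length →
      cfcGoA cycle cs consumed i =
        (if r < (cfcPrefix cs consumed).length then some (i + (r : Int)) else none) := by
  induction cs with
  | nil =>
    intro consumed i r _ _ hr
    simp only [cfcPrefix, List.length_nil, Nat.le_zero] at hr
    subst hr
    simp [cfcGoA, cfcPrefix]
  | cons c rest ih =>
    intro consumed i r hlt hge hr
    simp only [cfcPrefix, List.length_cons] at hlt hge hr ⊢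
    by_cases hc : cycle ≤ consumed + (if c = 0 then 1 else 2)
    · have hr0 : r = 0 := by
        by_contra h
        have h0 := hlt 0 (Nat.pos_of_ne_zero h)
        simp only [List.getD_cons_zero] at h0
        omega
      subst hr0
      simp [cfcGoA, hc]
    · have hrpos : r ≠ 0 := by
        intro h; subst h
        have h0 := hge (by omega)
        simp only [List.getD_cons_zero] at h0
        omega
      obtain ⟨r', rfl⟩ := Nat.exists_eq_succ_of_ne_zero hrpos
      have hrec := ih (consumed + (if c = 0 then 1 else 2)) (i + 1) r'
        (fun j hj => by have := hlt (j + 1) (by omega); simpa using this)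
        (fun h => by have := hge (by omega); simpa using this)
        (by omega)
      simp only [cfcGoA, if_neg hc]
      rw [hrec]
      by_cases h' : r' < (cfcPrefix rest (consumed + (if c = 0 then 1 else 2))).length
      · rw [if_pos h', if_pos (by omega)]
        congr 1
        push_cast
        ring
      · rw [if_neg h', if_neg (by omega)]

-- the binary search returns such a "least index" r
theorem cfcBsearch_char (pre : List Int) (cycle : Int)
    (hp : pre.Pairwise (· ≤ ·)) (lo hi : Nat) :
    hi ≤ pre.length → lo ≤ hi →
      (∀ j < lo, pre.getD j 0 < cycle) →
      (∀ j, hi ≤ j → j < pre.length → cycle ≤ pre.getD j 0) →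
      (∀ j < cfcBsearch pre cycle lo hi, pre.getD j 0 < cycle) ∧
      (cfcBsearch pre cycle lo hi < pre.length →
        cycle ≤ pre.getD (cfcBsearch pre cycle lo hi) 0) ∧
      cfcBsearch pre cycle lo hi ≤ hi := by
  induction lo, hi using cfcBsearch.induct pre cycle with
  | case1 lo hi hlh mid hmid ih =>
    intro hhi hle hlow hhigh
    have hm : mid = (lo + hi) / 2 := rfl
    rw [cfcBsearch, if_pos hlh]
    rw [if_pos hmid]
    obtain ⟨a, b, c⟩ := ih (by omega) (by omega)
      (fun j hj => by
        by_cases hjm : j ≤ mid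
        · exact lt_of_le_of_lt (cfcPrefix_mono pre hp j mid hjm (by omega)) hmid
        · exact hlow j (by omega))
      hhigh
    exact ⟨a, b, by omega⟩
  | case2 lo hi hlh mid hmid ih =>
    intro hhi hle hlow hhigh
    have hm : mid = (lo + hi) / 2 := rfl
    rw [cfcBsearch, if_pos hlh]
    rw [if_neg hmid]
    obtain ⟨a, b, c⟩ := ih (by omega) (by omega) hlow
      (fun j hj1 hj2 => le_trans (not_lt.mp hmid) (cfcPrefix_mono pre hp mid j hj1 hj2))
    simp only [hm] at a b c ⊢
    exact ⟨a, b, by omega⟩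
  | case3 lo hi hlh =>
    intro hhi hle hlow hhigh
    rw [cfcBsearch, if_neg hlh]
    exact ⟨hlow, fun h => hhigh lo (by omega) h, by omega⟩

-- ===== VERDICT (by name: the statement is the Claim_ definition above) =====
theorem command_for_cycle_spec : Claim_equal_command_for_cycle := by
  intro commands cycle _
  unfold Spec_command_for_cycle command_for_cycle command_for_cycle_alt
  obtain ⟨h1, h2, h3⟩ := cfcBsearch_char (cfcPrefix commands 0) cycle
    (cfcPrefix_pairwise _ _) 0 (cfcPrefix commands 0).length
    (le_refl _) (Nat.zero_le _) (fun j hj => by omega) (fun j hj1 hj2 => by omega)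
  rw [cfcGoA_char commands cycle 0 0 _ h1 h2 h3]
  split <;> simp_all
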